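-- pv_equiv track=rewrite | github.com/Algorithms-Design-and-Analysis/proyecto-3 | version-2/ProblemaP3.py | solve
-- ===== SOURCE A (Python) =====
-- def solve(graph, weights):
--     # Precompute neighbors
--     neighbors = [set(graph[v]) for v in range(len(graph))]
--
--     # Sort vertices by weight
--     vertices = sorted(range(len(graph)), key=lambda v: weights[v], reverse=True)
--
--     # Start with an empty clique and a set of all vertices
--     clique = []
--     total = 0
--     remaining = set(vertices)
--
--     # While the set of vertices is not empty...
--     for v in vertices:
--         if v not in remaining:
--             continue
--
--         # Check if adding v to the clique would result in a non-clique
--         if any(w not in neighbors[v] for w in clique):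
--             continue
--
--         # Add v to the clique and update remaining vertices
--         clique.append(v)
--         total += weights[v]
--         remaining.remove(v)
--
--     return total, clique
-- ===== SOURCE B (Python) =====
-- def solve(graph, weights):
--     neighbors = [set(row) for row in graph]
--     order = sorted(range(len(graph)), key=lambda v: weights[v], reverse=True)
--     # Keep a shrinking candidate set instead of rescanning the clique per vertex:
--     # after admitting v, only vertices whose neighbor list contains v stay candidates.
--     cands = set(order)
--     clique = []
--     for v in order:
--         if v in cands:
--             clique.append(v)
--             cands = {u for u in cands if v in neighbors[u]}
--     return sum(weights[v] for v in clique), clique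
-- ===== Notes on version B (the rewrite author's own statement) =====
-- stated objective: alternative
-- what changed: B drops A's per-vertex rescan of the clique and its 'remaining' set: it keeps a running candidate set that is intersected with the new member's reverse-neighbours after each admission, so admission is one membership test, and the total weight is computed by one final sum over the clique instead of an accumulator.
import Mathlib
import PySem

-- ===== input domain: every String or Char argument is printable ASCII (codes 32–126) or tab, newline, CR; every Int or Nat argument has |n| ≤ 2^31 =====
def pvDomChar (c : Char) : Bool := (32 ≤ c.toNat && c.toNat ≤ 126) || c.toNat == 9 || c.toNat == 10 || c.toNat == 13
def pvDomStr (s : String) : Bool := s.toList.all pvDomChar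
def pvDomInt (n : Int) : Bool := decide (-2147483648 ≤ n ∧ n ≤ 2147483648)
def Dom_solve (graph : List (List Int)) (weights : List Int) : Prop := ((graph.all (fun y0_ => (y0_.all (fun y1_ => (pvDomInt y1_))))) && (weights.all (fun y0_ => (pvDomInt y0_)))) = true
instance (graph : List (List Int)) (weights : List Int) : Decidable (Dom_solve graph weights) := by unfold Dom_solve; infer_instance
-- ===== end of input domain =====

-- B replaces A's per-candidate rescan of the clique (and its 'remaining' set) by a shrinking
-- candidate set filtered after each admission, summing weights at the end; equal return value,
-- no speed claim.


-- ===== PORT A =====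
-- loop body of A's 'for v in vertices' (state = (clique, total, remaining))
def stepA (nb : Int → PySem.Set Int) (weights : List Int)
    (st : List Int × Int × PySem.Set Int) (v : Int) : List Int × Int × PySem.Set Int :=
  if PySem.Set.contains st.2.2 v = false then st
  else if st.1.any (fun w => !(PySem.Set.contains (nb v) w)) then st
  else (st.1 ++ [v], st.2.1 + PySem.List.pyGetD weights v 0, (PySem.Set.remove? st.2.2 v).getD st.2.2)

def solve (graph : List (List Int)) (weights : List Int) : Int × List Int :=
  let neighbors : List (PySem.Set Int) := graph.map (fun row => PySem.Set.ofList row)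
  let nb : Int → PySem.Set Int := fun v => PySem.List.pyGetD neighbors v ([] : PySem.Set Int)
  let vertices : List Int :=
    PySem.List.sorted (PySem.List.pyRange 0 (graph.length : Int) 1)
      (fun v => PySem.List.pyGetD weights v 0) true
  let fin := vertices.foldl (stepA nb weights) ([], 0, PySem.Set.ofList vertices)
  (fin.2.1, fin.1)

-- ===== PORT B =====
-- structural recursion of B's 'for v in order' loop: the clique is produced front-first,
-- the candidate set shrinks by the filter after each admission
def pickB (nbs : Int → PySem.Set Int) (vs : List Int) (cands : PySem.Set Int) : List Int :=
  match vs with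
  | [] => []
  | v :: rest =>
      if PySem.Set.contains cands v then
        v :: pickB nbs rest (cands.filter (fun u => PySem.Set.contains (nbs u) v))
      else
        pickB nbs rest cands

def solve_alt (graph : List (List Int)) (weights : List Int) : Int × List Int :=
  let nbs : Int → PySem.Set Int :=
    fun u => PySem.List.pyGetD (graph.map (fun row => PySem.Set.ofList row)) u ([] : PySem.Set Int)
  let order : List Int :=
    PySem.List.sorted (PySem.List.pyRange 0 (graph.length : Int) 1)
      (fun v => PySem.List.pyGetD weights v 0) true
  let clique := pickB nbs order (PySem.Set.ofList order)
  (clique.foldl (fun s v => s + PySem.List.pyGetD weights v 0) 0, clique)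

-- ===== PRECONDITION & SPEC =====
-- Pre_ excludes exactly the inputs where the sort key weights[v] raises IndexError in BOTH programs
-- (some vertex index v < len(graph) has no weight); A returns on every input with enough weights.
def Pre_solve (graph : List (List Int)) (weights : List Int) : Prop :=
  graph.length ≤ weights.length
instance (graph : List (List Int)) (weights : List Int) : Decidable (Pre_solve graph weights) := by
  unfold Pre_solve; infer_instance
def pvWitness_solve : List (List Int) × List Int := ([[1], [0], [0, 1]], [3, 5, 4])
def Spec_solve (graph : List (List Int)) (weights : List Int) (out : Int × List Int) : Prop := out = solve_alt graph weights
instance (graph : List (List Int)) (weights : List Int) (out : Int × List Int) : Decidable (Spec_solve graph weights out) := by unfold Spec_solve; infer_instance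

-- ===== CLAIM (what is proved, stated in full; the proofs are below) =====
def Claim_equal_solve : Prop := ∀ (graph : List (List Int)) (weights : List Int), Dom_solve graph weights → Pre_solve graph weights → Spec_solve graph weights (solve graph weights)

-- ===== LEMMAS AND PROOFS =====

-- weight-sum of a clique, as B computes it
def sumW (weights : List Int) (l : List Int) : Int :=
  l.foldl (fun s v => s + PySem.List.pyGetD weights v 0) 0

lemma sumW_shift (weights : List Int) :
    ∀ (l : List Int) (a : Int),
      l.foldl (fun s v => s + PySem.List.pyGetD weights v 0) a = a + sumW weights l := by
  intro l
  induction l with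
  | nil => intro a; simp [sumW]
  | cons v t ih =>
      intro a
      simp only [List.foldl_cons, sumW]
      rw [ih (a + PySem.List.pyGetD weights v 0), ih (0 + PySem.List.pyGetD weights v 0)]
      ring

lemma sumW_cons (weights : List Int) (v : Int) (l : List Int) :
    sumW weights (v :: l) = PySem.List.pyGetD weights v 0 + sumW weights l := by
  simp only [sumW, List.foldl_cons]
  rw [sumW_shift weights l, sumW_shift weights l]
  ring

-- Invariant: `remaining` still holds every unprocessed vertex, and membership of a vertex v in
-- B's candidate set equals A's "every clique member is in v's neighbour set" test; under it
-- A's fold extends its clique exactly by pickB's output and its total by that clique's weight.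
lemma loop_eq (nb : Int → PySem.Set Int) (weights : List Int) :
    ∀ (rest clique : List Int) (total : Int) (r cand : PySem.Set Int),
      rest.Nodup →
      (∀ v ∈ rest, v ∈ r) →
      (∀ v ∈ rest, PySem.Set.contains cand v
          = !(clique.any (fun w => !(PySem.Set.contains (nb v) w)))) →
      (rest.foldl (stepA nb weights) (clique, total, r)).1
          = clique ++ pickB nb rest cand
        ∧ (rest.foldl (stepA nb weights) (clique, total, r)).2.1
          = total + sumW weights (pickB nb rest cand) := by
  intro rest
  induction rest with
  | nil => intro clique total r cand _ _ _; simp [pickB, sumW]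
  | cons v rest ih =>
    intro clique total r cand hnd hr hc
    have hvr : v ∈ r := hr v (List.mem_cons_self ..)
    have hvrc : PySem.Set.contains r v = true := (PySem.Set.contains_iff r v).mpr hvr
    have hcv := hc v (List.mem_cons_self ..)
    simp only [List.foldl_cons]
    by_cases hany : clique.any (fun w => !(PySem.Set.contains (nb v) w)) = true
    · -- A skips (clique test fails); B skips (v is not a candidate)
      have hcvf : PySem.Set.contains cand v = false := by rw [hcv, hany]; rfl
      have hA : stepA nb weights (clique, total, r) v = (clique, total, r) := by
        simp only [stepA, hvrc, hany]; simp
      have hB : pickB nb (v :: rest) cand = pickB nb rest cand := by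
        simp only [pickB, hcvf]; simp
      rw [hA, hB]
      exact ih clique total r cand hnd.of_cons
        (fun u hu => hr u (List.mem_cons_of_mem _ hu))
        (fun u hu => hc u (List.mem_cons_of_mem _ hu))
    · -- both admit v
      have hany' : clique.any (fun w => !(PySem.Set.contains (nb v) w)) = false :=
        Bool.eq_false_iff.mpr hany
      have hcvt : PySem.Set.contains cand v = true := by rw [hcv, hany']; rfl
      have hA : stepA nb weights (clique, total, r) v
          = (clique ++ [v], total + PySem.List.pyGetD weights v 0, PySem.Set.discard r v) := by
        simp only [stepA, hvrc, hany']
        simp [PySem.Set.remove?, hvr]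
      have hB : pickB nb (v :: rest) cand
          = v :: pickB nb rest (cand.filter (fun u => PySem.Set.contains (nb u) v)) := by
        simp only [pickB, hcvt]; simp
      rw [hA, hB]
      have ih' := ih (clique ++ [v]) (total + PySem.List.pyGetD weights v 0)
        (PySem.Set.discard r v)
        (cand.filter (fun u => PySem.Set.contains (nb u) v)) hnd.of_cons
        (by
          intro u hu
          exact (PySem.Set.mem_discard r v u).mpr
            ⟨hr u (List.mem_cons_of_mem _ hu),
             fun h => (List.nodup_cons.mp hnd).1 (h ▸ hu)⟩)
        (by
          intro u hu
          have hcu := hc u (List.mem_cons_of_mem _ hu)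
          have hL : PySem.Set.contains (cand.filter (fun u => PySem.Set.contains (nb u) v)) u
              = (PySem.Set.contains cand u && PySem.Set.contains (nb u) v) := by
            by_cases hm : u ∈ cand
            · by_cases hp : PySem.Set.contains (nb u) v = true
              · have hmf : u ∈ cand.filter (fun u => PySem.Set.contains (nb u) v) :=
                  List.mem_filter.mpr ⟨hm, hp⟩
                rw [(PySem.Set.contains_iff _ _).mpr hmf, (PySem.Set.contains_iff _ _).mpr hm, hp]
                rfl
              · have hp' : PySem.Set.contains (nb u) v = false := Bool.eq_false_iff.mpr hp
                have hmf : u ∉ cand.filter (fun u => PySem.Set.contains (nb u) v) :=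
                  fun h => hp ((List.mem_filter.mp h).2)
                rw [Bool.eq_false_iff.mpr (fun h => hmf ((PySem.Set.contains_iff _ _).mp h)), hp']
                simp
            · have h1 : PySem.Set.contains cand u = false :=
                Bool.eq_false_iff.mpr (fun h => hm ((PySem.Set.contains_iff _ _).mp h))
              have hmf : u ∉ cand.filter (fun u => PySem.Set.contains (nb u) v) :=
                fun h => hm ((List.mem_filter.mp h).1)
              rw [Bool.eq_false_iff.mpr (fun h => hmf ((PySem.Set.contains_iff _ _).mp h)), h1]
              simp
          have hR : (!((clique ++ [v]).any (fun w => !(PySem.Set.contains (nb u) w))))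
              = (!(clique.any (fun w => !(PySem.Set.contains (nb u) w))) && PySem.Set.contains (nb u) v) := by
            rw [List.any_append]
            simp [Bool.not_or]
          rw [hL, hR, hcu])
      refine ⟨?_, ?_⟩
      · rw [ih'.1, List.append_assoc]; rfl
      · rw [ih'.2, sumW_cons]; ring

lemma vertices_nodup (graph : List (List Int)) (weights : List Int) :
    (PySem.List.sorted (PySem.List.pyRange 0 (graph.length : Int) 1)
      (fun v => PySem.List.pyGetD weights v 0) true).Nodup :=
  (PySem.List.sorted_perm _ _ _).nodup_iff.mpr (PySem.List.nodup_pyRange_one _ _)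

-- ===== VERDICT (by name: the statement is the Claim_ definition above) =====
theorem solve_spec : Claim_equal_solve := by
  intro graph weights _ _
  simp only [Spec_solve, solve, solve_alt]
  have h := loop_eq
    (fun v => PySem.List.pyGetD (graph.map (fun row => PySem.Set.ofList row)) v ([] : PySem.Set Int))
    weights
    (PySem.List.sorted (PySem.List.pyRange 0 (graph.length : Int) 1)
      (fun v => PySem.List.pyGetD weights v 0) true)
    [] 0
    (PySem.Set.ofList (PySem.List.sorted (PySem.List.pyRange 0 (graph.length : Int) 1)
      (fun v => PySem.List.pyGetD weights v 0) true))
    (PySem.Set.ofList (PySem.List.sorted (PySem.List.pyRange 0 (graph.length : Int) 1)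
      (fun v => PySem.List.pyGetD weights v 0) true))
    (vertices_nodup graph weights)
    (fun v hv => (PySem.Set.mem_ofList _ _).mpr hv)
    (fun v hv => by
      rw [(PySem.Set.contains_iff _ _).mpr ((PySem.Set.mem_ofList _ _).mpr hv)]; rfl)
  rw [h.1, h.2]
  simp [sumW]
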